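-- pv_equiv track=rewrite | github.com/imranme/WhatsTrack | group_extractor/views.py | extract_numbers_from_group_dummy
-- ===== SOURCE A (Python) =====
-- def extract_group_name(link):
--     return link.rstrip('/').split('/')[-1]
--
-- def extract_numbers_from_group_dummy(link):
--     # your safe dummy fallback (keeps app usable if not posting real members)
--     group_name = extract_group_name(link)
--     dummy_groups = {
--         "BanglaFans": [f"+8801711{str(i).zfill(6)}" for i in range(1, 51)],
--         "PythonLovers": [f"+8801812{str(i).zfill(6)}" for i in range(1, 101)],
--         "TechGeeks": [f"+8801913{str(i).zfill(6)}" for i in range(1, 76)],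
--     }
--     return dummy_groups.get(group_name, ["+8801000000001", "+8801000000002", "+8801000000003"])
-- ===== SOURCE B (Python) =====
-- def extract_group_name(link):
--     return link.rstrip('/').split('/')[-1]
--
-- PARAMS = {
--     "BanglaFans": ("+8801711", 50),
--     "PythonLovers": ("+8801812", 100),
--     "TechGeeks": ("+8801913", 75),
-- }
--
-- FALLBACK = ["+8801000000001", "+8801000000002", "+8801000000003"]
--
-- def extract_numbers_from_group_dummy(link):
--     # Build only the one list that is needed, from a (prefix, count) table.
--     entry = PARAMS.get(extract_group_name(link))
--     if entry is None:
--         return list(FALLBACK)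
--     prefix, count = entry
--     return [prefix + str(i).zfill(6) for i in range(1, count + 1)]
-- ===== Notes on version B (the rewrite author's own statement) =====
-- stated objective: simpler
-- what changed: B replaces A's eagerly-built dict of three full number lists by a small (prefix, count) parameter table and generates only the one requested list (or returns the fixed fallback).
import Mathlib
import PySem

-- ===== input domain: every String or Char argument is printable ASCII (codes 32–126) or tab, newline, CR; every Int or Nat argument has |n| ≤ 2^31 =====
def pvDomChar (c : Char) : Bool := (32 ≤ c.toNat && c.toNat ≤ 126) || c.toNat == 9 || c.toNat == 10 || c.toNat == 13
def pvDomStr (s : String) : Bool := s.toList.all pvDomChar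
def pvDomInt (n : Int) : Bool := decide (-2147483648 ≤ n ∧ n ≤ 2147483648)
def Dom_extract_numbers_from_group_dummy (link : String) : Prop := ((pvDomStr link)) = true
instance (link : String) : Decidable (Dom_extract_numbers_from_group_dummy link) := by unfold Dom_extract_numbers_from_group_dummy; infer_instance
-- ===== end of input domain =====

-- B replaces A's dict of three pre-built lists by a (prefix, count) table and builds only the needed list; objective: simpler.

-- ===== PORT A =====
-- s.rstrip('/') — hand port (PySem has no rstrip-with-chars); exact: drops exactly the trailing '/' characters.
def pvRstripSlash (s : String) : String :=
  String.ofList ((s.toList.reverse.dropWhile (· == '/')).reverse)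

-- link.rstrip('/').split('/')[-1]; split('/') never returns [], so the pyGetD default is unreachable.
def extract_group_name (link : String) : String :=
  PySem.List.pyGetD (((PySem.Str.split? (pvRstripSlash link) "/").getD [])) (-1) ""

def extract_numbers_from_group_dummy (link : String) : List String :=
  let group_name := extract_group_name link
  let dummy_groups : PySem.Dict String (List String) :=
    ((PySem.Dict.empty.insert "BanglaFans"
        ((PySem.List.pyRange 1 51 1).map (fun i => "+8801711" ++ PySem.Str.zfill (PySem.Int.toStr i) 6))).insert
      "PythonLovers"
        ((PySem.List.pyRange 1 101 1).map (fun i => "+8801812" ++ PySem.Str.zfill (PySem.Int.toStr i) 6))).insert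
      "TechGeeks"
        ((PySem.List.pyRange 1 76 1).map (fun i => "+8801913" ++ PySem.Str.zfill (PySem.Int.toStr i) 6))
  dummy_groups.getD group_name ["+8801000000001", "+8801000000002", "+8801000000003"]

-- ===== PORT B =====
def pvParams : PySem.Dict String (String × Int) :=
  ((PySem.Dict.empty.insert "BanglaFans" ("+8801711", (50 : Int))).insert
    "PythonLovers" ("+8801812", (100 : Int))).insert
    "TechGeeks" ("+8801913", (75 : Int))

def pvFallback : List String := ["+8801000000001", "+8801000000002", "+8801000000003"]

def extract_numbers_from_group_dummy_alt (link : String) : List String :=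
  match pvParams.get? (extract_group_name link) with
  | none => pvFallback
  | some (pfx, count) =>
      (PySem.List.pyRange 1 (count + 1) 1).map (fun i => pfx ++ PySem.Str.zfill (PySem.Int.toStr i) 6)

-- ===== PRECONDITION & SPEC =====
def Spec_extract_numbers_from_group_dummy (link : String) (out : List String) : Prop := out = extract_numbers_from_group_dummy_alt link
instance (link : String) (out : List String) : Decidable (Spec_extract_numbers_from_group_dummy link out) := by unfold Spec_extract_numbers_from_group_dummy; infer_instance

-- ===== CLAIM (what is proved, stated in full; the proofs are below) =====
def Claim_equal_extract_numbers_from_group_dummy : Prop := ∀ (link : String), Dom_extract_numbers_from_group_dummy link → Spec_extract_numbers_from_group_dummy link (extract_numbers_from_group_dummy link)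

-- ===== LEMMAS AND PROOFS =====
theorem pv_lookup (g : String) :
    (((PySem.Dict.empty.insert "BanglaFans"
        ((PySem.List.pyRange 1 51 1).map (fun i => "+8801711" ++ PySem.Str.zfill (PySem.Int.toStr i) 6))).insert
      "PythonLovers"
        ((PySem.List.pyRange 1 101 1).map (fun i => "+8801812" ++ PySem.Str.zfill (PySem.Int.toStr i) 6))).insert
      "TechGeeks"
        ((PySem.List.pyRange 1 76 1).map (fun i => "+8801913" ++ PySem.Str.zfill (PySem.Int.toStr i) 6))
      : PySem.Dict String (List String)).getD g ["+8801000000001", "+8801000000002", "+8801000000003"] =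
    (match pvParams.get? g with
     | none => pvFallback
     | some (pfx, count) =>
         (PySem.List.pyRange 1 (count + 1) 1).map (fun i => pfx ++ PySem.Str.zfill (PySem.Int.toStr i) 6)) := by
  by_cases h1 : g = "BanglaFans"
  · subst h1; decide
  · by_cases h2 : g = "PythonLovers"
    · subst h2; decide
    · by_cases h3 : g = "TechGeeks"
      · subst h3; decide
      · simp [pvParams, PySem.Dict.getD, PySem.Dict.get?_insert_of_ne, h1, h2, h3, pvFallback]

-- ===== VERDICT (by name: the statement is the Claim_ definition above) =====
theorem extract_numbers_from_group_dummy_spec : Claim_equal_extract_numbers_from_group_dummy := by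
  intro link _
  unfold Spec_extract_numbers_from_group_dummy extract_numbers_from_group_dummy extract_numbers_from_group_dummy_alt
  exact pv_lookup (extract_group_name link)
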